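/- GENERATED by tools/from_farm_form.py from prooffarm-gif/accepted/DGifCloseFile.1/Lemmas.lean (a worked proof of the farm's unit `DGifCloseFile.1`,
   accepted by the verdict) — do not edit. -/
import Gif.Spec.Units.DGifCloseFile_1
import Gif.Spec.AllSegs

/-!
  Lemmas for the unit `DGifCloseFile.1` (0x109c60 … 0x109cb5, dgif_lib.c:683-692): the four pushes, `sub rsp, 8`, the two NULL
  tests of l.686 (both dead: gif and pv are live objects), the checked load of `gif.Image.ColorMap` and the NULL test of l.690.
  The segment is proved once per shape of the forest's `icm` component (the value the load delivers):

      cf1_none     `F.icm = none`: the field holds NULL, `je 109cb5` is taken, nothing is freed: the heap stays `H`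
      cf1_some     `F.icm = some mp`: `GifFreeMapObject(mp.obj)` (ghosts `mp.colors`, `3 * mp.count`), then the checked store of
                   NULL into the field: the heap is `(H.release mp.colors).release mp.obj`, the forest `noIcm F`

  The general lemmas used: Gif/Spec/Carry.lean §6 (`GifOK.icm_live`, `Owns.free_icm`), Gif/Spec/ForestCarry.lean §3
  (`Shape.set_icm`), Gif/Spec/Common.lean §5 (`Loose.stack`, `Loose.header`, `Loose.shadow`, `GifOK.sameExcept`).
-/

open X86 X86.User Asan ProgX.Base ProgX.Base.Spec Gif.Spec

set_option maxRecDepth 4000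
set_option maxHeartbeats 4000000

namespace Gif.Spec.DGifCloseFile_1

/-- **109C60H … 109CB5H when the image has no local colour map** (`F.icm = none`; dgif_lib.c:683-690): the prologue, the two dead
NULL tests of l.686, the checked load of `gif.Image.ColorMap` = NULL, `je 109cb5` taken. Only the function's own stack was
written: the heap is the entry's, the forest `noIcm F` is `F`. -/
theorem cf1_none (Lay : Layout) (hLay : Lay.hi = 0x1000000) (μ : Microarch) (hμ : UserX.MicroOK μ) (u₀ : State)
    (hcode : HasCodeNat Lay u₀ Gif.L.DGifCloseFile.entry Gif.Code.code_DGifCloseFile.nat Gif.L.DGifCloseFile.size)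
    (h_load8 : Asan.SmallCheck Lay μ ProgX.Base.WayInv (ProgX.Base.CodeOK u₀) [.rax, .rcx, .rdx] 8
      ProgX.Base.L.__asan_load8_noabort.entry)
    (H : Heap) (rest : List Obj) (frames : List (Nat × FrameLayout)) (F : Forest) (R : Rd) (e : State) (ret : Word)
    (he : AtEntry (conv u₀) Gif.L.DGifCloseFile.entry (DGifCloseFile.spec H rest frames F R).frame ret e)
    (hpre : (DGifCloseFile.spec H rest frames F R).pre e)
    (hicm : F.icm = none) :
    ReachVia Lay μ ProgX.Base.WayInv e (fun w =>
      ∃ (H' : Heap), DGifCloseFile.Ok Gif.L.DGifCloseFile.at_109cb5 H rest frames F R H' (DGifCloseFile.noIcm F) u₀ e ret w) := by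
  -- THE PRELUDE: the entry facts as numbers, the precondition's three clauses
  have he0 := he
  have hpre0 := hpre
  v_entry he
  obtain ⟨henv, hrdi, herr⟩ := hpre
  have hp := henv.heap
  have hok := henv.ok
  have hbase := hp.base
  have hlimit := hp.limit
  -- where gif and pv are, as numbers (only the linear parts: the `% 16` clause would stall `omega`)
  have hgin := hok.owns.inside hp.inv.heap (o := (F.gif, 120)) List.mem_cons_self
  have hpin := hok.owns.inside hp.inv.heap (o := (F.pv, 24936)) (List.mem_cons_of_mem _ List.mem_cons_self)
  simp only at hgin hpin
  rw [hbase] at hgin hpin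
  have hg1 := hgin.1
  have hg2 := hgin.2.2.2.2
  have hp1 := hpin.1
  have hp2 := hpin.2.2.2.2
  clear hgin hpin
  -- the two loads (`gif.Private`, `gif.Image.ColorMap`) as facts about the entry memory, in the walker's form
  have hpriv := hok.shape.priv
  have hicmS := hok.shape.icm
  rw [hicm] at hicmS
  simp only [MapAt, gfield] at hpriv hicmS
  have l_priv : e.mem.readLE (e.reg .rdi + 0x70) 8 = F.pv := by
    rw [rd_eq_readLE e.mem (e.reg .rdi + 0x70) (F.gif + 112) 8 (by u_omega)]
    exact hpriv
  have l_icm : e.mem.readLE (e.reg .rdi + 0x40) 8 = 0 := by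
    rw [rd_eq_readLE e.mem (e.reg .rdi + 0x40) (F.gif + 64) 8 (by u_omega)]
    exact hicmS
  have hgl : LiveIn (H.liveObjs ++ rest) frames F.gif 120 :=
    hok.gif_live.liveIn rest frames (Nat.le_refl _) (Nat.le_refl _)
  -- THE WALK from 0x109c60 (dgif_lib.c:683)
  u_walk hcode [hμ.vendor] until [Gif.L.DGifCloseFile.at_109cb5] span [ProgX.Base.L.textLo, ProgX.Base.L.textHi] side (v_side)
  case check_109c7d =>
    -- 0x109c7d (dgif_lib.c:686): the load of `gif.Private` lies inside gif
    have hun : ShadowUntouched e.mem s_109c7d.mem := by v_untouched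
    exact hgl.accSmall hp.inv.shadow hun _ 8 (by decide) (by u_omega) (by u_omega)
  case check_109c91 =>
    -- 0x109c91 (dgif_lib.c:690): the load of `gif.Image.ColorMap` lies inside gif
    have hun : ShadowUntouched e.mem s_109c91.mem := by v_untouched
    exact hgl.accSmall hp.inv.shadow hun _ 8 (by decide) (by u_omega) (by u_omega)
  -- 0x109cb5 (dgif_lib.c:695): `gif.Image.ColorMap == NULL`, nothing was freed
  have hcur := henv.ctx.cursor_range hp.inv.shadow
  have hun : ShadowUntouched e.mem s_109c9d.mem := by v_untouched
  -- the footprint since the entry: the four pushes and the check calls' return address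
  have hs : Mem.SameExcept [⟨(e.reg .rsp).toNat - 48, (e.reg .rsp).toNat⟩] e.mem s_109c9d.mem := by
    rw [w_mem]
    u_same
  have hloose : ∀ w, w ∈ [(⟨(e.reg .rsp).toNat - 48, (e.reg .rsp).toNat⟩ : Span)] → Loose H F R w := by
    intro w hw
    have e1 := List.mem_singleton.mp hw
    subst e1
    exact Loose.stack hp.inv.heap (by simp only; omega) (by simp only; omega) (by simp only; omega)
  have hwin : ∀ w, w ∈ [(⟨(e.reg .rsp).toNat - 48, (e.reg .rsp).toNat⟩ : Span)] →
      (w.hi ≤ H.base ∨ H.base + 32 + H.used ≤ w.lo) ∨ ∃ o, o ∈ H.objs ∧ o.base ≤ w.lo ∧ w.hi ≤ o.base + o.cap := by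
    intro w hw
    have e1 := List.mem_singleton.mp hw
    subst e1
    left
    left
    rw [hbase]
    simp only
    omega
  have hinv1 : HeapInv H rest frames ((e.reg .rsp).toNat - 40) s_109c9d.mem :=
    (hp.inv.sameExcept hun hs hwin).lower (by omega) (by omega) (by omega)
  have hok1 : GifOK H F R s_109c9d.mem := hok.sameExcept hp.inv.heap ⟨hcur.1, hcur.2.1⟩ hs hloose
  have hrem1 : rem R s_109c9d.mem = rem R e.mem := by
    apply rem_sameExcept hs (by omega)
    intro w hw
    have e1 := List.mem_singleton.mp hw
    subst e1
    simp only
    omega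
  -- THE EXIT ASSERTION `Ok` at 0x109cb5 with the entry's heap
  refine ReachVia.done ⟨H, ?_, ?_⟩
  · exact {
      entry := he0
      pre := hpre0
      rip := w_rip
      rsp := w_rsp
      rbx := w_rbx
      rbp := w_rbp
      r14 := w_kept.get .r14 rfl
      r15 := w_kept.get .r15 rfl
      slot_r13 := by
        rw [w_mem]
        u_read
      slot_r12 := by
        rw [w_mem]
        u_read
      slot_rbp := by
        rw [w_mem]
        u_read
      slot_rbx := by
        rw [w_mem]
        u_read
      slot_ra := by
        rw [w_mem]
        u_frame he_retAddr
      inv := hinv1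
      region := SameRegion.refl H
      rem := hrem1
      same := by
        rw [w_mem]
        u_same
      code := ProgX.Base.conv_code_in w_eq
      abi := by
        refine ProgX.Base.abiInv_of ?_ ?_
        · rw [w_flags]
          simp only [X86.User.df_setStatus]
          exact w_df_109c91
        · rw [w_mxcsr]
          exact he_mx
    }
  · have e1 : DGifCloseFile.noIcm F = F := Forest.set_icm_eq hicm
    rw [e1]
    exact hok1

/-- **109C60H … 109CB5H when the image has the local colour map `mp`** (`F.icm = some mp`; dgif_lib.c:683-692): the prologue, the
two dead NULL tests of l.686, the checked load of `gif.Image.ColorMap` = `mp.obj ≠ NULL`, `GifFreeMapObject(mp.obj)` (both objects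
of the map live and different: `GifOK.icm_live`), the checked store of NULL into the field (gif is still live:
`Owns.free_icm`). The heap is `(H.release mp.colors).release mp.obj`; the shape of `noIcm F` by `Shape.set_icm`: every window
written is loose (stack, the two headers' state words, the two objects' shadow) or the field itself. -/
theorem cf1_some (Lay : Layout) (hLay : Lay.hi = 0x1000000) (μ : Microarch) (hμ : UserX.MicroOK μ) (u₀ : State)
    (hcode : HasCodeNat Lay u₀ Gif.L.DGifCloseFile.entry Gif.Code.code_DGifCloseFile.nat Gif.L.DGifCloseFile.size)
    (h_load8 : Asan.SmallCheck Lay μ ProgX.Base.WayInv (ProgX.Base.CodeOK u₀) [.rax, .rcx, .rdx] 8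
      ProgX.Base.L.__asan_load8_noabort.entry)
    (h_store8 : Asan.SmallCheck Lay μ ProgX.Base.WayInv (ProgX.Base.CodeOK u₀) [.rax, .rcx, .rdx] 8
      ProgX.Base.L.__asan_store8_noabort.entry)
    (H : Heap) (rest : List Obj) (frames : List (Nat × FrameLayout)) (F : Forest) (R : Rd) (e : State) (ret : Word)
    (mp : Map)
    (h_free : Calls Lay μ ProgX.Base.WayInv (ProgX.Base.conv u₀) Gif.L.GifFreeMapObject.entry
      (Gif.Spec.GifFreeMapObject.spec H rest frames mp.colors (3 * mp.count)))
    (he : AtEntry (conv u₀) Gif.L.DGifCloseFile.entry (DGifCloseFile.spec H rest frames F R).frame ret e)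
    (hpre : (DGifCloseFile.spec H rest frames F R).pre e)
    (hicm : F.icm = some mp) :
    ReachVia Lay μ ProgX.Base.WayInv e (fun w =>
      ∃ (H' : Heap), DGifCloseFile.Ok Gif.L.DGifCloseFile.at_109cb5 H rest frames F R H' (DGifCloseFile.noIcm F) u₀ e ret w) := by
  -- THE PRELUDE: the entry facts as numbers, the precondition's three clauses
  have he0 := he
  have hpre0 := hpre
  v_entry he
  obtain ⟨henv, hrdi, herr⟩ := hpre
  have hp := henv.heap
  have hok := henv.ok
  have hbase := hp.base
  have hlimit := hp.limit
  -- where gif, pv and the two objects of the map are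
  have hgin := hok.owns.inside hp.inv.heap (o := (F.gif, 120)) List.mem_cons_self
  have hpin := hok.owns.inside hp.inv.heap (o := (F.pv, 24936)) (List.mem_cons_of_mem _ List.mem_cons_self)
  have hoin := hok.owns.inside hp.inv.heap (o := (mp.obj, 24))
    (Forest.mem_owned_icm (by rw [hicm]; exact List.mem_cons_self))
  have hcin := hok.owns.inside hp.inv.heap (o := (mp.colors, 3 * mp.count))
    (Forest.mem_owned_icm (by rw [hicm]; exact List.mem_cons_of_mem _ List.mem_cons_self))
  simp only at hgin hpin hoin hcin
  rw [hbase] at hgin hpin hoin hcin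
  have hg1 := hgin.1
  have hg2 := hgin.2.2.2.2
  have hp1 := hpin.1
  have hp2 := hpin.2.2.2.2
  have ho1 := hoin.1
  have ho2 := hoin.2.2.2.2
  have hq1 := hcin.1
  have hq2 := hcin.2.2.2.2
  clear hgin hpin hoin hcin
  obtain ⟨hlobj, hlcol, hne, hcol⟩ := hok.icm_live hicm
  -- the two loads (`gif.Private`, `gif.Image.ColorMap`) as facts about the entry memory, in the walker's form
  have hpriv := hok.shape.priv
  have hicmS := hok.shape.icm
  rw [hicm] at hicmS
  have hptr := hicmS.1
  simp only [gfield] at hpriv hptr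
  have l_priv : e.mem.readLE (e.reg .rdi + 0x70) 8 = F.pv := by
    rw [rd_eq_readLE e.mem (e.reg .rdi + 0x70) (F.gif + 112) 8 (by u_omega)]
    exact hpriv
  have l_icm : e.mem.readLE (e.reg .rdi + 0x40) 8 = mp.obj := by
    rw [rd_eq_readLE e.mem (e.reg .rdi + 0x40) (F.gif + 64) 8 (by u_omega)]
    exact hptr
  have hgl : LiveIn (H.liveObjs ++ rest) frames F.gif 120 :=
    hok.gif_live.liveIn rest frames (Nat.le_refl _) (Nat.le_refl _)
  have ho64 : (UInt64.ofNat mp.obj).toNat = mp.obj := toNat_ofNat_addr mp.obj (by omega)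
  -- THE WALK from 0x109c60 (dgif_lib.c:683)
  u_walk hcode [hμ.vendor] until [Gif.L.DGifCloseFile.at_109cb5] span [ProgX.Base.L.textLo, ProgX.Base.L.textHi] side (v_side)
  case check_109c7d =>
    -- 0x109c7d (dgif_lib.c:686): the load of `gif.Private` lies inside gif
    have hun : ShadowUntouched e.mem s_109c7d.mem := by v_untouched
    exact hgl.accSmall hp.inv.shadow hun _ 8 (by decide) (by u_omega) (by u_omega)
  case check_109c91 =>
    -- 0x109c91 (dgif_lib.c:690): the load of `gif.Image.ColorMap` lies inside gif
    have hun : ShadowUntouched e.mem s_109c91.mem := by v_untouched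
    exact hgl.accSmall hp.inv.shadow hun _ 8 (by decide) (by u_omega) (by u_omega)
  case call_inv =>
    v_inv
  case pre_109c9f =>
    -- 0x109c9f (dgif_lib.c:691) `GifFreeMapObject(gif.Image.ColorMap)`: the heap's precondition under the lower stack pointer;
    -- the map object and its colour array are live and different, the `Colors` field agrees
    have hun : ShadowUntouched e.mem s_109c9f.mem := by v_untouched
    have hsame : Mem.EqOn H.base H.limit e.mem s_109c9f.mem := by
      rw [hbase, hlimit, w_mem]
      u_eqon
    refine ⟨hp.callee hun hsame ?_ ?_ ?_, Or.inr ?_⟩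
    · rw [w_rsp]
      u_omega
    · rw [w_rsp]
      u_omega
    · rw [w_rsp]
      u_omega
    · rw [w_rdi, ho64]
      refine ⟨hlobj, hlcol, hne, ?_⟩
      simp only [gfield] at hcol ⊢
      rw [← hcol]
      exact hsame.rd (mp.obj + 16) 8 (by omega) (by omega) (by omega)
  -- 0x109ca4 (ret3): `GifFreeMapObject` has returned: the heap is `(H.release mp.colors).release mp.obj`
  have hne1 : (s_109c9f.reg .rdi).toNat ≠ 0 := by
    rw [w_rdi_109c9f, ho64]
    omega
  have hinv1 := w_post.2 hne1
  rw [w_rdi_109c9f, ho64] at hinv1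
  clear w_post
  have e8 : (s_109c9f.reg .rsp).toNat + 8 = (e.reg .rsp).toNat - 40 := by
    rw [w_rsp_109c9f]
    u_omega
  rw [e8] at hinv1
  v_after_call w_rsp_109c9f w_mem_109c9f
  -- `he_align` makes `omega` give up on the shadow windows' side conditions: keep it in a form `omega` does not read
  have halign : ∃ k, (e.reg .rsp).toNat = 8 * k := ⟨(e.reg .rsp).toNat / 8, by omega⟩
  clear he_align
  simp only [shadowSpan, w_rdi_109c9f, ho64] at w_same
  -- the saved registers and the return address, over the pushes and through the callee's footprint
  have hp13 : s_109c9f.mem.readLE (e.reg .rsp - 8) 8 = (e.reg .r13).toNat := by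
    rw [w_mem_109c9f]
    u_read
  rw [w_mem_109c9f] at hp13
  have hs13 : s_109c9fr.mem.readLE (e.reg .rsp - 8) 8 = (e.reg .r13).toNat := by u_frame hp13
  have hp12 : s_109c9f.mem.readLE (e.reg .rsp - 16) 8 = (e.reg .r12).toNat := by
    rw [w_mem_109c9f]
    u_read
  rw [w_mem_109c9f] at hp12
  have hs12 : s_109c9fr.mem.readLE (e.reg .rsp - 16) 8 = (e.reg .r12).toNat := by u_frame hp12
  have hpbp : s_109c9f.mem.readLE (e.reg .rsp - 24) 8 = (e.reg .rbp).toNat := by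
    rw [w_mem_109c9f]
    u_read
  rw [w_mem_109c9f] at hpbp
  have hsbp : s_109c9fr.mem.readLE (e.reg .rsp - 24) 8 = (e.reg .rbp).toNat := by u_frame hpbp
  have hpbx : s_109c9f.mem.readLE (e.reg .rsp - 32) 8 = (e.reg .rbx).toNat := by
    rw [w_mem_109c9f]
    u_read
  rw [w_mem_109c9f] at hpbx
  have hsbx : s_109c9fr.mem.readLE (e.reg .rsp - 32) 8 = (e.reg .rbx).toNat := by u_frame hpbx
  have hpra : UInt64.ofNat (s_109c9f.mem.readLE (e.reg .rsp) 8) = ret := by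
    rw [w_mem_109c9f]
    u_frame he_retAddr
  rw [w_mem_109c9f] at hpra
  have hsra : UInt64.ofNat (s_109c9fr.mem.readLE (e.reg .rsp) 8) = ret := by u_frame hpra
  -- the footprint since the entry
  have hsame1 : Mem.SameExcept
    [⟨(e.reg .rsp).toNat - 160, (e.reg .rsp).toNat⟩,
     ⟨mp.colors - 24, mp.colors - 16⟩,
     ⟨0xC00000 + mp.colors / 8, 0xC00000 + (mp.colors + 3 * mp.count + 7) / 8⟩,
     ⟨mp.obj - 24, mp.obj - 16⟩,
     ⟨0xC00000 + mp.obj / 8, 0xC00000 + (mp.obj + 24 + 7) / 8⟩] e.mem s_109c9fr.mem := by u_same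
  clear hp13 hp12 hpbp hpbx hpra
  -- what is owned in the new heap: the forest without the map; gif is still live
  have howns1 : Owns ((H.release mp.colors).release mp.obj) (DGifCloseFile.noIcm F).owned := hok.owns.free_icm hicm
  have hglive1 : ((H.release mp.colors).release mp.obj).Live F.gif 120 := howns1.live (F.gif, 120) List.mem_cons_self
  have hcur := henv.ctx.cursor_range hp.inv.shadow
  -- THE SECOND WALK from 0x109ca4 (dgif_lib.c:692) to the cut
  u_walk hcode [hμ.vendor] until [Gif.L.DGifCloseFile.at_109cb5] span [ProgX.Base.L.textLo, ProgX.Base.L.textHi] side (v_side)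
  case check_109ca8 =>
    -- 0x109ca8 (dgif_lib.c:692): the store of `gif.Image.ColorMap` lies inside gif, live in the new heap
    have hun : ShadowUntouched s_109c9fr.mem s_109ca8.mem := by v_untouched
    have hgl1 : LiveIn (((H.release mp.colors).release mp.obj).liveObjs ++ rest) frames F.gif 120 :=
      hglive1.liveIn rest frames (Nat.le_refl _) (Nat.le_refl _)
    exact hgl1.accSmall hinv1.shadow hun _ 8 (by decide) (by u_omega) (by u_omega)
  -- 0x109cb5 (dgif_lib.c:695): the map is freed, `gif.Image.ColorMap = NULL`
  have hbase1 : ((H.release mp.colors).release mp.obj).base = 0x800000 := hbase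
  -- the footprint since the entry: the function's stack, the callee's four windows, the pointer field
  have hsame2 : Mem.SameExcept
    [⟨(e.reg .rsp).toNat - 160, (e.reg .rsp).toNat⟩,
     ⟨mp.colors - 24, mp.colors - 16⟩,
     ⟨0xC00000 + mp.colors / 8, 0xC00000 + (mp.colors + 3 * mp.count + 7) / 8⟩,
     ⟨mp.obj - 24, mp.obj - 16⟩,
     ⟨0xC00000 + mp.obj / 8, 0xC00000 + (mp.obj + 24 + 7) / 8⟩,
     ⟨F.gif + 64, F.gif + 72⟩] e.mem s_109cad.mem := by
    rw [w_mem]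
    u_same
  -- the heap's invariant over the two stores: the check's return address (stack), the pointer field (inside gif)
  have hinv2 : HeapInv ((H.release mp.colors).release mp.obj) rest frames ((e.reg .rsp).toNat - 40) s_109cad.mem := by
    rw [w_mem]
    apply HeapInv.writeLE_live _ hglive1
    · u_omega
    · u_omega
    · apply hinv1.writeLE_out
      · u_omega
      · left
        rw [hbase1]
        u_omega
      · left
        u_omega
  -- the shape: every window written is loose or the pointer field, which holds NULL
  obtain ⟨cc, hlcc⟩ := hlcol
  obtain ⟨co, hlco⟩ := hlobj
  have hshape2 : Shape (DGifCloseFile.noIcm F) R s_109cad.mem := by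
    refine hok.shape.set_icm (hok.owns.placed hp.inv.heap) hp.inv.heap ⟨hcur.1, hcur.2.1⟩ hsame2 ?_ none ?_
    · intro w hw
      simp only [List.mem_cons, List.not_mem_nil, or_false] at hw
      rcases hw with rfl | rfl | rfl | rfl | rfl | rfl
      · left
        exact Loose.stack hp.inv.heap (by simp only; omega) (by simp only; omega) (by simp only; omega)
      · left
        exact Loose.header hp.inv.heap ⟨hcur.1, hcur.2.1⟩ hlcc (by simp only; omega) (by simp only; omega)
      · left
        exact Loose.shadow hp.inv.heap hcur.2.1 (by simp only; omega)
      · left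
        exact Loose.header hp.inv.heap ⟨hcur.1, hcur.2.1⟩ hlco (by simp only; omega) (by simp only; omega)
      · left
        exact Loose.shadow hp.inv.heap hcur.2.1 (by simp only; omega)
      · right
        exact ⟨Nat.le_refl _, Nat.le_refl _⟩
    · show GifFileType.Image.ColorMap s_109cad.mem F.gif = 0
      simp only [gfield]
      rw [w_mem, rd_writeLE_same _ (e.reg .rdi + 64) 8 0 (F.gif + 64) (by u_omega) (by decide)]
  have hrem2 : rem R s_109cad.mem = rem R e.mem := by
    apply rem_sameExcept hsame2 (by omega)
    intro w hw
    simp only [List.mem_cons, List.not_mem_nil, or_false] at hw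
    rcases hw with rfl | rfl | rfl | rfl | rfl | rfl
    all_goals (simp only; omega)
  -- THE EXIT ASSERTION `Ok` at 0x109cb5 with the heap of GifFreeMapObject's post
  refine ReachVia.done ⟨(H.release mp.colors).release mp.obj, ?_, ⟨howns1, hshape2⟩⟩
  exact {
    entry := he0
    pre := hpre0
    rip := w_rip
    rsp := w_rsp
    rbx := w_rbx
    rbp := w_rbp
    r14 := w_kept.get .r14 rfl
    r15 := w_kept.get .r15 rfl
    slot_r13 := by
      rw [w_mem]
      u_frame hs13
    slot_r12 := by
      rw [w_mem]
      u_frame hs12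
    slot_rbp := by
      rw [w_mem]
      u_frame hsbp
    slot_rbx := by
      rw [w_mem]
      u_frame hsbx
    slot_ra := by
      rw [w_mem]
      u_frame hsra
    inv := hinv2
    region := (SameRegion.release H mp.colors).trans (SameRegion.release _ mp.obj)
    rem := hrem2
    same := by
      rw [w_mem]
      u_same
    code := ProgX.Base.conv_code_in w_eq
    abi := by
      refine ProgX.Base.abiInv_of ?_ ?_
      · rw [w_flags]
        exact w_df_109ca8
      · rw [w_mxcsr]
        exact w_mx
  }

end Gif.Spec.DGifCloseFile_1
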